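-- pv_equiv track=rewrite | github.com/bennybeats625/mint_ii | mint_ii_functions.py | beat_mapping
-- ===== SOURCE A (Python) =====
-- beat_map = [1, 2, 4, 8, 16, 32, 64, 128]
--
-- BEAT_CNT_OFFSET = 1
--
-- POSITION_OFFSET = BEAT_CNT_OFFSET + int(len(beat_map))
--
-- def beat_mapping(tokens):
--     new_tokens = []
--
--     # Step 1: Split the token sequence into alternating groups of beat tokens and non-beat tokens
--     grouped_sequences = []
--     current_group = []
--     is_beat_group = BEAT_CNT_OFFSET <= tokens[0] < POSITION_OFFSET  # Check if first token is a beat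
--
--     for token in tokens:
--         if (BEAT_CNT_OFFSET <= token < POSITION_OFFSET) == is_beat_group:
--             current_group.append(token)
--         else:
--             grouped_sequences.append(current_group)
--             current_group = [token]
--             is_beat_group = not is_beat_group  # Toggle group type
--
--     if current_group:
--         grouped_sequences.append(current_group)
--
--     # Step 2: Process each sequence separately
--     for group in grouped_sequences:
--         if len(group) == 1 and BEAT_CNT_OFFSET <= group[0] < POSITION_OFFSET:
--             # Skip single 1s, since they remain a 1
--             new_tokens.append(group[0])
--             continue
--
--         if BEAT_CNT_OFFSET <= group[0] < POSITION_OFFSET:  # It's a beat sequence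
--             count = len(group)
--
--             # While there are beats left to process
--             while count > 0:
--                 for i in reversed(range(len(beat_map))):
--                     val = beat_map[i]
--                     if count >= val:
--                         new_tokens.append(BEAT_CNT_OFFSET + i)
--                         count -= val
--                         break
--
--         else:  # Non-beat tokens, just append them
--             new_tokens.extend(group)
--
--     return new_tokens
-- ===== SOURCE B (Python) =====
-- BEAT_CNT_OFFSET = 1
--
-- POSITION_OFFSET = BEAT_CNT_OFFSET + 8
--
--
-- def _flush(out, run, first):
--     # Emit the encoding of a completed beat run of length `run` starting with token `first`.
--     if run == 1:
--         out.append(first)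
--     elif run > 1:
--         q, r = divmod(run, 128)
--         out.extend([BEAT_CNT_OFFSET + 7] * q)
--         for b in (7, 6, 5, 4, 3, 2, 1, 0):
--             if (r >> b) & 1:
--                 out.append(BEAT_CNT_OFFSET + b)
--
--
-- def beat_mapping(tokens):
--     # Single streaming pass: non-beat tokens pass through; beat runs are
--     # counted and flushed as a power-of-2 decomposition at each boundary.
--     out = []
--     run = 0
--     first = 0
--     for t in tokens:
--         if BEAT_CNT_OFFSET <= t < POSITION_OFFSET:
--             if run == 0:
--                 first = t
--             run += 1
--         else:
--             _flush(out, run, first)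
--             run = 0
--             out.append(t)
--     _flush(out, run, first)
--     return out
-- ===== Notes on version B (the rewrite author's own statement) =====
-- stated objective: simpler
-- what changed: Replaces A's two-phase pass (build an explicit list of alternating groups, then re-scan each group with a nested while/for greedy loop over beat_map) by a single streaming pass that only tracks the current beat-run length and first token, flushing each run with a divmod-by-128 plus bit-test decomposition instead of the greedy table scan.
import Mathlib
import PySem

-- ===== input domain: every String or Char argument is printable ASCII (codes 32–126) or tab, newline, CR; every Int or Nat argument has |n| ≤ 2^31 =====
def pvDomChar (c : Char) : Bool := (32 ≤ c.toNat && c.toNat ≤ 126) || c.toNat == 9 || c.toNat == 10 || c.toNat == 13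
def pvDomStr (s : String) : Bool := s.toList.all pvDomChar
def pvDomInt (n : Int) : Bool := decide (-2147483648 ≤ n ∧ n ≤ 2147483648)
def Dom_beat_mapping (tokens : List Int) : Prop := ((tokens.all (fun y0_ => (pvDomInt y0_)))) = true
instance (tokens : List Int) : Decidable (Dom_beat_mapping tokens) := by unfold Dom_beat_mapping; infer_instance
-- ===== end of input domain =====

-- B replaces A's group-then-process two-phase pass by a single streaming pass that
-- decomposes each beat-run length with divmod/bit tests (objective: simpler one-pass).

-- ===== PORT A =====
-- beat_map = [1, 2, 4, 8, 16, 32, 64, 128]  (values are run-length weights, kept as Nat)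
def pvBeatMapA : List Nat := [1, 2, 4, 8, 16, 32, 64, 128]

-- BEAT_CNT_OFFSET <= t < POSITION_OFFSET  (module-level constants: 1 and 9)
def pvIsBeat (t : Int) : Bool := 1 ≤ t && t < 9

-- 'for i in reversed(range(len(beat_map))): if count >= beat_map[i]: … break'
def pvFindVal (count : Nat) : List Nat → Option (Nat × Nat)
  | [] => none
  | i :: rest =>
    let val := pvBeatMapA.getD i 0
    if val ≤ count then some (i, val) else pvFindVal count rest

-- 'while count > 0: …'; fuel = the initial count makes the loop total (each step subtracts ≥ 1)
def pvGreedy : Nat → Nat → List Int → List Int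
  | 0, _, nt => nt
  | fuel + 1, count, nt =>
    if 0 < count then
      match pvFindVal count [7, 6, 5, 4, 3, 2, 1, 0] with
      | some (i, val) => pvGreedy fuel (count - val) (nt ++ [(1 : Int) + (i : Int)])
      | none => nt
    else nt

-- Step 1 loop body: grow current_group or close it and toggle the group type
def pvGroupStep (st : List (List Int) × List Int × Bool) (t : Int) :
    List (List Int) × List Int × Bool :=
  let (gs, cur, ib) := st
  if pvIsBeat t == ib then (gs, cur ++ [t], ib) else (gs ++ [cur], [t], !ib)

-- Step 2 body: one group appended into new_tokens
def pvProcGroup (nt : List Int) (g : List Int) : List Int :=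
  match g with
  | [] => nt   -- unreachable: the grouping loop never yields an empty group
  | g0 :: _ =>
    if g.length == 1 && pvIsBeat g0 then nt ++ [g0]
    else if pvIsBeat g0 then pvGreedy g.length g.length nt
    else nt ++ g

def beat_mapping (tokens : List Int) : List Int :=
  match tokens with
  | [] => []   -- Python raises IndexError at tokens[0]; excluded by Pre_beat_mapping
  | t0 :: _ =>
    let st := tokens.foldl pvGroupStep ([], [], pvIsBeat t0)
    let gs := if st.2.1 ≠ [] then st.1 ++ [st.2.1] else st.1
    gs.foldl pvProcGroup []

-- ===== PORT B =====
-- _flush(out, run, first): emit the encoding of a completed beat run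
def pvFlush (out : List Int) (run : Nat) (first : Int) : List Int :=
  if run == 1 then out ++ [first]
  else if 1 < run then
    let q := run / 128
    let r := run % 128
    [7, 6, 5, 4, 3, 2, 1, 0].foldl
      (fun o (b : Nat) => if (r >>> b) % 2 == 1 then o ++ [(1 : Int) + (b : Int)] else o)
      (out ++ List.replicate q (8 : Int))
  else out

-- the single streaming loop of B
def pvStream (out : List Int) (run : Nat) (first : Int) : List Int → List Int
  | [] => pvFlush out run first
  | t :: ts =>
    if pvIsBeat t then
      if run == 0 then pvStream out 1 t ts
      else pvStream out (run + 1) first ts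
    else pvStream (pvFlush out run first ++ [t]) 0 first ts

def beat_mapping_alt (tokens : List Int) : List Int := pvStream [] 0 0 tokens

-- ===== PRECONDITION & SPEC =====
-- Pre_ excludes only the empty list, on which A raises IndexError (tokens[0]).
def Pre_beat_mapping (tokens : List Int) : Prop := tokens ≠ []
instance (tokens : List Int) : Decidable (Pre_beat_mapping tokens) := by
  unfold Pre_beat_mapping; infer_instance
def pvWitness_beat_mapping : List Int := [3, 3, 10, 5]

def Spec_beat_mapping (tokens : List Int) (out : List Int) : Prop := out = beat_mapping_alt tokens
instance (tokens : List Int) (out : List Int) : Decidable (Spec_beat_mapping tokens out) := by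
  unfold Spec_beat_mapping; infer_instance

-- ===== CLAIM (what is proved, stated in full; the proofs are below) =====
def Claim_equal_beat_mapping : Prop := ∀ (tokens : List Int), Dom_beat_mapping tokens → Pre_beat_mapping tokens → Spec_beat_mapping tokens (beat_mapping tokens)

-- ===== LEMMAS AND PROOFS =====

-- proof-side: the bit-emitting fold of pvFlush started from the empty accumulator
def pvBitsAux (r : Nat) : List Int :=
  [7, 6, 5, 4, 3, 2, 1, 0].foldl
    (fun o (b : Nat) => if (r >>> b) % 2 == 1 then o ++ [(1 : Int) + (b : Int)] else o) []

-- proof-side: closed meaning of the greedy decomposition of a run length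
def pvGd (c : Nat) : List Int := List.replicate (c / 128) (8 : Int) ++ pvBitsAux (c % 128)

-- proof-side: the maximal runs of equal beat-ness
def pvRuns : List Int → List (List Int)
  | [] => []
  | t :: ts =>
    (t :: ts.takeWhile (fun x => pvIsBeat x == pvIsBeat t)) ::
      pvRuns (ts.dropWhile (fun x => pvIsBeat x == pvIsBeat t))
  termination_by ts => ts.length
  decreasing_by simp; exact List.length_dropWhile_le _ _

-- proof-side: the meaning of B's streaming loop
def pvSpecB : List Int → List Int
  | [] => []
  | t :: ts =>
    if pvIsBeat t then
      pvFlush [] (1 + (ts.takeWhile pvIsBeat).length) t ++ pvSpecB (ts.dropWhile pvIsBeat)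
    else t :: pvSpecB ts
  termination_by ts => ts.length
  decreasing_by
  · simp; exact List.length_dropWhile_le _ _
  · simp

theorem pvGreedy_acc (fuel : Nat) : ∀ (count : Nat) (nt : List Int),
    pvGreedy fuel count nt = nt ++ pvGreedy fuel count [] := by
  induction fuel with
  | zero => intro count nt; simp [pvGreedy]
  | succ f ih =>
    intro count nt
    simp only [pvGreedy]
    split
    · cases h : pvFindVal count [7, 6, 5, 4, 3, 2, 1, 0] with
      | none => simp
      | some p =>
        obtain ⟨i, val⟩ := p
        simp only [List.nil_append]
        rw [ih (count - val) (nt ++ [(1 : Int) + (i : Int)]),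
          ih (count - val) ([(1 : Int) + (i : Int)])]
        simp
    · simp

theorem pvFindVal_pos {c i val : Nat} (_hc : 0 < c)
    (h : pvFindVal c [7, 6, 5, 4, 3, 2, 1, 0] = some (i, val)) : 1 ≤ val ∧ val ≤ c := by
  simp only [pvFindVal, pvBeatMapA, List.getD] at h
  split_ifs at h <;> simp_all <;> omega

theorem pvFindVal_big {c : Nat} (hc : 128 ≤ c) :
    pvFindVal c [7, 6, 5, 4, 3, 2, 1, 0] = some (7, 128) := by
  simp only [pvFindVal, pvBeatMapA, List.getD]
  norm_num
  omega

theorem pvGreedy_fuel : ∀ (c : Nat) (f₁ f₂ : Nat), c ≤ f₁ → c ≤ f₂ →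
    pvGreedy f₁ c [] = pvGreedy f₂ c [] := by
  intro c
  induction c using Nat.strong_induction_on with
  | _ c ih =>
    intro f₁ f₂ h1 h2
    cases c with
    | zero => cases f₁ <;> cases f₂ <;> simp [pvGreedy]
    | succ c' =>
      obtain ⟨g₁, rfl⟩ : ∃ g, f₁ = g + 1 := ⟨f₁ - 1, by omega⟩
      obtain ⟨g₂, rfl⟩ : ∃ g, f₂ = g + 1 := ⟨f₂ - 1, by omega⟩
      simp only [pvGreedy, Nat.succ_pos, if_pos]
      cases h : pvFindVal (c' + 1) [7, 6, 5, 4, 3, 2, 1, 0] with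
      | none => simp
      | some p =>
        obtain ⟨i, val⟩ := p
        obtain ⟨hv1, hv2⟩ := pvFindVal_pos (Nat.succ_pos c') h
        simp only [List.nil_append]
        rw [pvGreedy_acc g₁, pvGreedy_acc g₂]
        congr 1
        exact ih (c' + 1 - val) (by omega) g₁ g₂ (by omega) (by omega)

theorem pvGreedy_small : ∀ c : Fin 128, pvGreedy c.val c.val [] = pvGd c.val := by
  decide

theorem pvGreedy_gd : ∀ (c : Nat) (fuel : Nat), c ≤ fuel → pvGreedy fuel c [] = pvGd c := by
  intro c
  induction c using Nat.strong_induction_on with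
  | _ c ih =>
    intro fuel hf
    by_cases hbig : 128 ≤ c
    · obtain ⟨g, rfl⟩ : ∃ g, fuel = g + 1 := ⟨fuel - 1, by omega⟩
      simp only [pvGreedy, pvFindVal_big hbig]
      rw [if_pos (by omega), pvGreedy_acc, ih (c - 128) (by omega) g (by omega)]
      unfold pvGd
      have h1 : c / 128 = (c - 128) / 128 + 1 := by omega
      have h2 : (c - 128) % 128 = c % 128 := by omega
      rw [h1, h2, List.replicate_succ]
      norm_num
    · rw [pvGreedy_fuel c fuel c hf le_rfl]
      exact pvGreedy_small ⟨c, by omega⟩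

theorem pvGroup_fold : ∀ (ts : List Int) (gs : List (List Int)) (cur : List Int) (ib : Bool),
    cur ≠ [] → (∀ x ∈ cur, pvIsBeat x = ib) →
    (let st := ts.foldl pvGroupStep (gs, cur, ib);
      if st.2.1 ≠ [] then st.1 ++ [st.2.1] else st.1)
    = gs ++ (cur ++ ts.takeWhile (fun x => pvIsBeat x == ib)) ::
        pvRuns (ts.dropWhile (fun x => pvIsBeat x == ib)) := by
  intro ts
  induction ts with
  | nil => intro gs cur ib hne hall; simp [pvRuns, hne]
  | cons t ts ih =>
    intro gs cur ib hne hall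
    by_cases h : pvIsBeat t = ib
    · have hstep : pvGroupStep (gs, cur, ib) t = (gs, cur ++ [t], ib) := by
        simp [pvGroupStep, h]
      simp only [List.foldl_cons, hstep]
      rw [ih gs (cur ++ [t]) ib (by simp) ?_]
      · simp [h]
      · intro x hx
        rcases List.mem_append.1 hx with hx | hx
        · exact hall x hx
        · simp at hx; subst hx; exact h
    · have hb : pvIsBeat t = !ib := by cases ib <;> cases hbt : pvIsBeat t <;> simp_all
      have hstep : pvGroupStep (gs, cur, ib) t = (gs ++ [cur], [t], !ib) := by
        simp [pvGroupStep, h]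
      simp only [List.foldl_cons, hstep]
      rw [ih (gs ++ [cur]) [t] (!ib) (by simp) (by simp [hb])]
      have hf : (pvIsBeat t == ib) = false := by simp [h]
      have hR : pvRuns (t :: ts)
          = (t :: ts.takeWhile (fun x => pvIsBeat x == !ib)) ::
              pvRuns (ts.dropWhile (fun x => pvIsBeat x == !ib)) := by
        conv_lhs => rw [pvRuns.eq_def]
        simp only [hb]
      simp [hf, hR]

theorem pvProcGroup_acc (nt g : List Int) : pvProcGroup nt g = nt ++ pvProcGroup [] g := by
  cases g with
  | nil => simp [pvProcGroup]
  | cons g0 gr =>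
    simp only [pvProcGroup]
    split_ifs with h1 h2
    · simp
    · rw [pvGreedy_acc]
    · simp

theorem pvFoldProc (gs : List (List Int)) : ∀ nt,
    gs.foldl pvProcGroup nt = nt ++ gs.flatMap (fun g => pvProcGroup [] g) := by
  induction gs with
  | nil => intro nt; simp
  | cons g gs ih =>
    intro nt
    simp only [List.foldl_cons, List.flatMap_cons]
    rw [pvProcGroup_acc, ih]
    simp

theorem pvBitsFold_acc (r : Nat) : ∀ (l : List Nat) (out init : List Int),
    l.foldl (fun o (b : Nat) => if (r >>> b) % 2 == 1 then o ++ [(1 : Int) + (b : Int)] else o)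
        (out ++ init)
      = out ++ l.foldl
          (fun o (b : Nat) => if (r >>> b) % 2 == 1 then o ++ [(1 : Int) + (b : Int)] else o)
          init := by
  intro l
  induction l with
  | nil => intro out init; simp
  | cons b l ih =>
    intro out init
    simp only [List.foldl_cons]
    split
    · rw [List.append_assoc]; exact ih out (init ++ [(1 : Int) + (b : Int)])
    · exact ih out init

theorem pvFlush_acc (out : List Int) (run : Nat) (first : Int) :
    pvFlush out run first = out ++ pvFlush [] run first := by
  simp only [pvFlush]
  split_ifs with h1 h2
  · simp
  · rw [List.nil_append, ← pvBitsFold_acc]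
  · simp

theorem pvFlush_big (run : Nat) (first : Int) (h : 1 < run) :
    pvFlush [] run first = pvGd run := by
  have h1 : (run == 1) = false := by simp; omega
  simp only [pvFlush, h1, Bool.false_eq_true, if_false, if_pos h, List.nil_append]
  have := pvBitsFold_acc (run % 128) [7, 6, 5, 4, 3, 2, 1, 0]
    (List.replicate (run / 128) (8 : Int)) []
  simp only [List.append_nil] at this
  rw [this]
  rfl

theorem pvSpecB_cons_beat (t : Int) (ts : List Int) (h : pvIsBeat t = true) :
    pvSpecB (t :: ts)
      = pvFlush [] (1 + (ts.takeWhile pvIsBeat).length) t ++ pvSpecB (ts.dropWhile pvIsBeat) := by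
  conv_lhs => rw [pvSpecB.eq_def]
  simp [h]

theorem pvSpecB_cons_nonbeat (t : Int) (ts : List Int) (h : pvIsBeat t = false) :
    pvSpecB (t :: ts) = t :: pvSpecB ts := by
  conv_lhs => rw [pvSpecB.eq_def]
  simp [h]

theorem pvStream_spec : ∀ (n : Nat) (ts : List Int), ts.length ≤ n →
    (∀ out first, pvStream out 0 first ts = out ++ pvSpecB ts) ∧
    (∀ out run first, 1 ≤ run → pvStream out run first ts
      = out ++ pvFlush [] (run + (ts.takeWhile pvIsBeat).length) first
          ++ pvSpecB (ts.dropWhile pvIsBeat)) := by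
  intro n
  induction n with
  | zero =>
    intro ts hts
    have : ts = [] := List.eq_nil_of_length_eq_zero (Nat.le_zero.mp hts)
    subst this
    refine ⟨fun out first => by simp [pvStream, pvSpecB, pvFlush], fun out run first hrun => by
      simp only [pvStream, List.takeWhile_nil, List.dropWhile_nil, List.length_nil, Nat.add_zero]
      rw [pvFlush_acc]
      simp [pvSpecB]⟩
  | succ n ihn =>
    intro ts hts
    cases ts with
    | nil =>
      refine ⟨fun out first => by simp [pvStream, pvSpecB, pvFlush], fun out run first hrun => by
        simp only [pvStream, List.takeWhile_nil, List.dropWhile_nil, List.length_nil, Nat.add_zero]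
        rw [pvFlush_acc]
        simp [pvSpecB]⟩
    | cons t ts =>
      have hlen : ts.length ≤ n := by simpa using hts
      obtain ⟨ih1, ih2⟩ := ihn ts hlen
      constructor
      · intro out first
        by_cases hbt : pvIsBeat t
        · simp only [pvStream, hbt, beq_self_eq_true, if_pos]
          rw [ih2 out 1 t le_rfl, pvSpecB_cons_beat t ts hbt]
          simp
        · simp only [pvStream, hbt, Bool.false_eq_true, if_false]
          have h0 : pvFlush out 0 first = out := by simp [pvFlush]
          rw [h0, ih1, pvSpecB_cons_nonbeat t ts (by simpa using hbt)]
          simp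
      · intro out run first hrun
        by_cases hbt : pvIsBeat t
        · have hz : (run == 0) = false := by simp; omega
          simp only [pvStream, hbt, if_true, hz, Bool.false_eq_true, if_false]
          rw [ih2 out (run + 1) first (by omega)]
          simp only [List.takeWhile_cons, hbt, if_true, List.dropWhile_cons, List.length_cons]
          have : run + 1 + (ts.takeWhile pvIsBeat).length
              = run + ((ts.takeWhile pvIsBeat).length + 1) := by omega
          rw [this]
        · simp only [pvStream, hbt, Bool.false_eq_true, if_false]
          rw [pvFlush_acc out run first, ih1]
          simp only [List.takeWhile_cons, hbt, Bool.false_eq_true, if_false,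
            List.dropWhile_cons, List.length_nil, Nat.add_zero]
          rw [pvSpecB_cons_nonbeat t ts (by simpa using hbt)]
          simp

theorem pvSpecB_nonbeat_run : ∀ ts : List Int,
    pvSpecB ts = (ts.takeWhile (fun x => pvIsBeat x == false))
      ++ pvSpecB (ts.dropWhile (fun x => pvIsBeat x == false)) := by
  intro ts
  induction ts with
  | nil => simp
  | cons t ts ih =>
    by_cases hbt : pvIsBeat t
    · simp [hbt]
    · rw [pvSpecB_cons_nonbeat t ts (by simpa using hbt)]
      simp only [List.takeWhile_cons, List.dropWhile_cons, hbt]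
      simp [ih]

theorem pvRuns_spec : ∀ (n : Nat) (ts : List Int), ts.length ≤ n →
    (pvRuns ts).flatMap (fun g => pvProcGroup [] g) = pvSpecB ts := by
  intro n
  induction n with
  | zero =>
    intro ts hts
    have : ts = [] := List.eq_nil_of_length_eq_zero (Nat.le_zero.mp hts)
    subst this
    simp [pvRuns, pvSpecB]
  | succ n ihn =>
    intro ts hts
    cases ts with
    | nil => simp [pvRuns, pvSpecB]
    | cons t ts =>
      have hlen : (ts.dropWhile (fun x => pvIsBeat x == pvIsBeat t)).length ≤ n := by
        have := List.length_dropWhile_le (fun x => pvIsBeat x == pvIsBeat t) ts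
        simp at hts; omega
      have hR : pvRuns (t :: ts)
          = (t :: ts.takeWhile (fun x => pvIsBeat x == pvIsBeat t)) ::
              pvRuns (ts.dropWhile (fun x => pvIsBeat x == pvIsBeat t)) := by
        conv_lhs => rw [pvRuns.eq_def]
      rw [hR]
      simp only [List.flatMap_cons]
      by_cases hbt : pvIsBeat t
      · have hpred : (fun x => pvIsBeat x == pvIsBeat t) = pvIsBeat := by
          funext x; simp [hbt]
        rw [hpred] at hlen ⊢
        rw [ihn (ts.dropWhile pvIsBeat) hlen, pvSpecB_cons_beat t ts hbt]
        congr 1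
        cases htw : ts.takeWhile pvIsBeat with
        | nil => simp [pvProcGroup, hbt, pvFlush]
        | cons a l =>
          have hlen1 : ((t :: a :: l).length == 1) = false := by simp
          simp only [pvProcGroup, hlen1, Bool.false_and, Bool.false_eq_true, if_false, hbt,
            if_true]
          rw [pvGreedy_gd _ _ le_rfl, pvFlush_big _ _ (by simp)]
          congr 1
          simp
          omega
      · have hbf : pvIsBeat t = false := by simpa using hbt
        have hpred : (fun x => pvIsBeat x == pvIsBeat t) = (fun x => pvIsBeat x == false) := by
          funext x; rw [hbf]
        rw [hpred] at hlen ⊢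
        rw [ihn _ hlen, pvSpecB_cons_nonbeat t ts hbf]
        have hproc : pvProcGroup [] (t :: ts.takeWhile (fun x => pvIsBeat x == false))
            = t :: ts.takeWhile (fun x => pvIsBeat x == false) := by
          simp [pvProcGroup, hbf]
        rw [hproc]
        rw [pvSpecB_nonbeat_run ts]
        simp

-- ===== VERDICT (by name: the statement is the Claim_ definition above) =====
theorem beat_mapping_spec : Claim_equal_beat_mapping := by
  intro tokens _hdom hpre
  unfold Spec_beat_mapping
  cases tokens with
  | nil => exact absurd rfl hpre
  | cons t0 ts =>
    show beat_mapping (t0 :: ts) = beat_mapping_alt (t0 :: ts)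
    unfold beat_mapping beat_mapping_alt
    simp only [List.foldl_cons]
    have hstep : pvGroupStep ([], [], pvIsBeat t0) t0 = ([], [t0], pvIsBeat t0) := by
      simp [pvGroupStep]
    rw [hstep]
    have hg := pvGroup_fold ts [] [t0] (pvIsBeat t0) (by simp) (by simp)
    simp only [] at hg ⊢
    rw [hg]
    have hR : pvRuns (t0 :: ts)
        = (t0 :: ts.takeWhile (fun x => pvIsBeat x == pvIsBeat t0)) ::
            pvRuns (ts.dropWhile (fun x => pvIsBeat x == pvIsBeat t0)) := by
      conv_lhs => rw [pvRuns.eq_def]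
    rw [List.nil_append, show ([t0] ++ ts.takeWhile (fun x => pvIsBeat x == pvIsBeat t0))
        = t0 :: ts.takeWhile (fun x => pvIsBeat x == pvIsBeat t0) from rfl, ← hR]
    rw [pvFoldProc, List.nil_append, pvRuns_spec (t0 :: ts).length (t0 :: ts) le_rfl]
    exact ((pvStream_spec (t0 :: ts).length (t0 :: ts) le_rfl).1 [] 0).symm
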